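-- pv_equiv track=rewrite | github.com/Sy3058/coding-test | 백준/Silver/2785. 체인/체인.py | solution
-- ===== SOURCE A (Python) =====
-- def solution(n, chain):
--   uc = 0 # used chain
--
--   for c in chain:
--     if c == n - 1: # 체인 하나를 해체하면 모든 체인을 연결할 수 있음
--       return uc + c
--
--     elif c > n - 1:
--       return uc + n - 1
--
--     else:
--       n -= (c + 1) # 길이가 c인 체인을 해체하면 c + 1개만큼 연결 가능
--       uc += c
-- ===== SOURCE B (Python) =====
-- def solution(n, chain):
--     # stage 1: prefix sums of (c + 1)
--     prefix = []
--     total = 0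
--     for c in chain:
--         total += c + 1
--         prefix.append(total)
--     # stage 2: all indices whose prefix sum reaches n; answer from the first one
--     hits = [i for i, p in enumerate(prefix) if p >= n]
--     if hits:
--         return n - hits[0] - 1
-- ===== Notes on version B (the rewrite author's own statement) =====
-- stated objective: alternative
-- what changed: B replaces A's stateful early-return scan (mutating n and uc with a three-way branch) by staged passes over materialized data: it first builds the prefix-sum list of (c+1), then collects all crossing indices with a comprehension and computes n - hits[0] - 1 from the first; no state mutation of n, no early exit, no branch on c vs n-1.
-- outside the precondition, e.g. on solution(10, [1, 2]): A returns None, B returns None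
import Mathlib
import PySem

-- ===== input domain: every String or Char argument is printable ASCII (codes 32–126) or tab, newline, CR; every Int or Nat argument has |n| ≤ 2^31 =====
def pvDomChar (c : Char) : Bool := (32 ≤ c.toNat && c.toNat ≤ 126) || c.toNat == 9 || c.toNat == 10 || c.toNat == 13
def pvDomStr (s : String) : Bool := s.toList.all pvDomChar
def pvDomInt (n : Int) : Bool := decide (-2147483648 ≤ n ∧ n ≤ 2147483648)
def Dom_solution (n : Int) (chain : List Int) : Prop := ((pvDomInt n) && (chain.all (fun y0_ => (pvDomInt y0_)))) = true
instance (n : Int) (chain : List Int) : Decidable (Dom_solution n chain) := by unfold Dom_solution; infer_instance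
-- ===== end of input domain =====

-- B replaces A's stateful early-return scan by staged passes: build the prefix-sum list,
-- collect all crossing indices, answer from the first (objective: alternative decomposition).


-- ===== PORT A =====
-- loop over chain with state (n, uc); the Python falls off (returns None, not an int) when the
-- loop finishes — those inputs are excluded by Pre_solution, the port returns 0 there.
def solGoA (n uc : Int) : List Int → Int
  | [] => 0
  | c :: rest =>
    if c = n - 1 then uc + c
    else if c > n - 1 then uc + n - 1
    else solGoA (n - (c + 1)) (uc + c) rest

def solution (n : Int) (chain : List Int) : Int := solGoA n 0 chain

-- ===== PORT B =====
-- stage 1 of Source B: the list of prefix sums of (c + 1)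
def bPrefix (total : Int) : List Int → List Int
  | [] => []
  | c :: rest => (total + c + 1) :: bPrefix (total + c + 1) rest

-- stage 2: all crossing indices (the comprehension), then n - hits[0] - 1; falls off to 0
-- on the excluded inputs (Python returns None there).
def solution_alt (n : Int) (chain : List Int) : Int :=
  let pref := bPrefix 0 chain
  let hits := (pref.zipIdx.filter (fun pi => decide (n ≤ pi.1))).map (fun pi => (pi.2 : Int))
  match hits with
  | [] => 0
  | i :: _ => n - i - 1

-- ===== PRECONDITION & SPEC =====
-- Pre_ excludes exactly the inputs on which A's loop completes without returning, where the
-- Python returns None (not an int): some prefix sum of (c+1) must reach n.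
def Pre_solution (n : Int) (chain : List Int) : Prop :=
  ∃ i ∈ List.range chain.length, n ≤ (chain.take (i + 1)).foldl (fun a c => a + (c + 1)) 0
instance (n : Int) (chain : List Int) : Decidable (Pre_solution n chain) := by
  unfold Pre_solution; infer_instance
def pvWitness_solution : Int × List Int := (5, [1, 2, 3])

def Spec_solution (n : Int) (chain : List Int) (out : Int) : Prop := out = solution_alt n chain
instance (n : Int) (chain : List Int) (out : Int) : Decidable (Spec_solution n chain out) := by unfold Spec_solution; infer_instance

-- ===== CLAIM (what is proved, stated in full; the proofs are below) =====
def Claim_equal_solution : Prop := ∀ (n : Int) (chain : List Int), Dom_solution n chain → Pre_solution n chain → Spec_solution n chain (solution n chain)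

-- ===== LEMMAS AND PROOFS =====
-- A's state after consuming k elements with running (c+1)-sum t is (n - t, t - k); the first
-- crossing pair of the (shifted) prefix list determines A's return value n - j - 1.
lemma solGo_key (chain : List Int) : ∀ (n t : Int) (k : Nat),
    solGoA (n - t) (t - k) chain =
      match ((bPrefix t chain).zipIdx k).filter (fun pi => decide (n ≤ pi.1)) with
      | [] => 0
      | (_, j) :: _ => n - j - 1 := by
  induction chain with
  | nil => intro n t k; rfl
  | cons c rest ih =>
    intro n t k
    simp only [bPrefix, List.zipIdx_cons, List.filter_cons]
    by_cases h : n ≤ t + c + 1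
    · rw [if_pos (by simpa using h)]
      show solGoA (n - t) (t - (k : Int)) (c :: rest) = n - (k : Int) - 1
      simp only [solGoA]
      by_cases h1 : c = n - t - 1
      · rw [if_pos h1]; omega
      · rw [if_neg h1, if_pos (by omega)]; omega
    · rw [if_neg (by simpa using h)]
      simp only [solGoA]
      rw [if_neg (by omega), if_neg (by omega)]
      have e := ih n (t + c + 1) (k + 1)
      have e1 : n - t - (c + 1) = n - (t + c + 1) := by ring
      have e2 : t - k + c = t + c + 1 - ((k + 1 : Nat) : Int) := by push_cast; ring
      rw [e1, e2, e]

-- ===== VERDICT (by name: the statement is the Claim_ definition above) =====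
theorem solution_spec : Claim_equal_solution := by
  intro n chain _ _
  show solution n chain = solution_alt n chain
  have h := solGo_key chain n 0 0
  simp only [solution, solution_alt]
  rw [show n - 0 = n by ring, show (0 : Int) - (0 : Nat) = 0 by simp] at h
  rw [h]
  cases hf : (bPrefix 0 chain).zipIdx.filter (fun pi => decide (n ≤ pi.1)) with
  | nil => simp
  | cons p rest => simp
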